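-- pv_equiv track=rewrite | github.com/wpwupingwp/treehub | web/database.py | tid
-- ===== SOURCE A (Python) =====
-- def tid(tree_id: int) -> str:
--     """
--     Generate TreeID from tree_id in database
--     Since postgresql serial is 4*8 bit, if id is too big,
--     alter table and return raw number.
--     TID format: 'T00A100000'
--         first letter, 'T'
--         2-4, digit or capital letter, 0-9 and A-Z
--         5-10, digit
--     Args:
--         tree_id: tree_id, postgresql serial number
--
--     Returns:
--         tid: str
--     """
--     max_n = min(36 ** 3 * 100_000, 2 ** (8 * 4 - 1))
--     prefix = 'T'
--     n = 1_000_00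
--     if tree_id >= max_n:
--         return 'T' + str(tree_id)
--     # 0-9 and A-Z
--     base = 26 + 10
--
--     a, b = divmod(tree_id, n)
--     letters = ''
--     while a > 0:
--         a, digit = divmod(a, base)
--         if digit < 10:
--             letters = str(digit) + letters
--         else:
--             letters = chr(ord('A') + (digit - 10)) + letters
--     return prefix + f'{letters:>03}' + f'{b:05d}'
-- ===== SOURCE B (Python) =====
-- def tid(tree_id: int) -> str:
--     """Encode database id into formatted TreeID string (direct positional digits)."""
--     max_n = min(36 ** 3 * 100_000, 2 ** (8 * 4 - 1))
--     if tree_id >= max_n: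
--         return 'T' + str(tree_id)
--     a, b = divmod(tree_id, 100_000)
--     hi, rem = divmod(a, 36 * 36)
--     mid, lo = divmod(rem, 36)
--     def ch(d):
--         return str(d) if d < 10 else chr(ord('A') + d - 10)
--     return 'T' + ch(hi) + ch(mid) + ch(lo) + f'{b:05d}'
-- ===== Notes on version B (the rewrite author's own statement) =====
-- stated objective: simpler
-- what changed: Replaces the string-accumulator while-loop plus '>03' zero-fill formatting by a direct computation of the three base-36 positional digits with two divmods, emitting exactly three letter characters with natural leading zeros.
-- outside the precondition, e.g. on tid(-1): A returns 'T00099999', B returns 'T-1ZZ99999'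
import Mathlib
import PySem

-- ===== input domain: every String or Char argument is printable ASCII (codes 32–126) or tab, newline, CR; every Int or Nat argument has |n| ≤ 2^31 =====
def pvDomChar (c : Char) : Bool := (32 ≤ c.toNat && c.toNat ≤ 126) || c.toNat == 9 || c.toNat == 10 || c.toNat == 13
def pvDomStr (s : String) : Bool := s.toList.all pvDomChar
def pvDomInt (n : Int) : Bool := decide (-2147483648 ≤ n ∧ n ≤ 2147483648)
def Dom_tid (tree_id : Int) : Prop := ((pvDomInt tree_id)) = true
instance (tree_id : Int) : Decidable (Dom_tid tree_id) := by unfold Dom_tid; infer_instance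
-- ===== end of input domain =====

-- B replaces A's string-accumulator while-loop and '>03' zero-fill by a direct two-divmod
-- computation of the three base-36 positional digits (objective: simpler).

-- ===== PORT A =====
-- shared: the digit→char step both Pythons contain verbatim
-- ('str(digit)' if digit < 10 else chr(ord('A') + digit - 10); exact for 0 ≤ digit < 36, the only reachable values)
def pyDigitChar (d : Int) : List Char :=
  if d < 10 then PySem.Int.toChars d else [Char.ofNat ('A'.toNat + (d - 10).toNat)]

-- shared: zero-fill left-padding; this is both f'{letters:>03}' and f'{b:05d}' (exact for the
-- nonnegative b that `mod … 100000` always yields)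
def pad0 (w : Nat) (cs : List Char) : List Char := List.replicate (w - cs.length) '0' ++ cs

-- A's while-loop, as recursion on the same state (a, letters)
def tidLoop (a : Int) (letters : List Char) : List Char :=
  if _h : 0 < a then
    tidLoop (PySem.Int.floordiv a 36) (pyDigitChar (PySem.Int.mod a 36) ++ letters)
  else letters
termination_by a.toNat
decreasing_by
  rw [PySem.Int.floordiv_eq_ediv_of_pos (by norm_num)]; omega

def tid (tree_id : Int) : String :=
  if tree_id ≥ min (36 ^ 3 * 100000) (2 ^ (8 * 4 - 1)) then
    String.ofList ('T' :: PySem.Int.toChars tree_id)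
  else
    let a := PySem.Int.floordiv tree_id 100000
    let b := PySem.Int.mod tree_id 100000
    String.ofList ('T' :: (pad0 3 (tidLoop a []) ++ pad0 5 (PySem.Int.toChars b)))

-- ===== PORT B =====
def tid_alt (tree_id : Int) : String :=
  if tree_id ≥ min (36 ^ 3 * 100000) (2 ^ (8 * 4 - 1)) then
    String.ofList ('T' :: PySem.Int.toChars tree_id)
  else
    let a := PySem.Int.floordiv tree_id 100000
    let b := PySem.Int.mod tree_id 100000
    let hi := PySem.Int.floordiv a (36 * 36)
    let rem := PySem.Int.mod a (36 * 36)
    let mid := PySem.Int.floordiv rem 36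
    let lo := PySem.Int.mod rem 36
    String.ofList ('T' :: (pyDigitChar hi ++ (pyDigitChar mid ++ (pyDigitChar lo ++ pad0 5 (PySem.Int.toChars b)))))

-- ===== PRECONDITION & SPEC =====
-- Pre_ restricts to the function's natural domain (postgresql serial ids are ≥ 0): on negative ids
-- A's floor-divmod plus a skipped loop accidentally collide with the encodings of small nonnegative ids.
def Pre_tid (tree_id : Int) : Prop := 0 ≤ tree_id
instance (tree_id : Int) : Decidable (Pre_tid tree_id) := by unfold Pre_tid; infer_instance
def pvWitness_tid : Int := 12345

def Spec_tid (tree_id : Int) (out : String) : Prop := out = tid_alt tree_id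
instance (tree_id : Int) (out : String) : Decidable (Spec_tid tree_id out) := by unfold Spec_tid; infer_instance

-- ===== CLAIM (what is proved, stated in full; the proofs are below) =====
def Claim_equal_tid : Prop := ∀ (tree_id : Int), Dom_tid tree_id → Pre_tid tree_id → Spec_tid tree_id (tid tree_id)

-- ===== LEMMAS AND PROOFS =====

lemma pyDigitChar_len (d : Int) (h0 : 0 ≤ d) (h1 : d < 36) : (pyDigitChar d).length = 1 := by
  interval_cases d <;> decide

lemma tidLoop_nonpos (a : Int) (acc : List Char) (h : ¬ 0 < a) : tidLoop a acc = acc := by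
  rw [tidLoop]; simp [h]

lemma tidLoop_pos (a : Int) (acc : List Char) (h : 0 < a) :
    tidLoop a acc = tidLoop (PySem.Int.floordiv a 36) (pyDigitChar (PySem.Int.mod a 36) ++ acc) := by
  rw [tidLoop]; simp [h]

lemma letters_eq (a : Int) (h0 : 0 ≤ a) (h1 : a < 46656) :
    pad0 3 (tidLoop a []) =
      pyDigitChar (PySem.Int.floordiv a (36 * 36)) ++
        (pyDigitChar (PySem.Int.floordiv (PySem.Int.mod a (36 * 36)) 36) ++
          pyDigitChar (PySem.Int.mod (PySem.Int.mod a (36 * 36)) 36)) := by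
  have e36 : ∀ x : Int, PySem.Int.floordiv x 36 = x / 36 :=
    fun x => PySem.Int.floordiv_eq_ediv_of_pos (by norm_num)
  have m36 : ∀ x : Int, PySem.Int.mod x 36 = x % 36 :=
    fun x => PySem.Int.mod_eq_emod_of_pos (by norm_num)
  have e1296 : ∀ x : Int, PySem.Int.floordiv x (36 * 36) = x / 1296 :=
    fun x => by norm_num [PySem.Int.floordiv_eq_ediv_of_pos (show (0:Int) < 1296 by norm_num) (a := x)]
  have m1296 : ∀ x : Int, PySem.Int.mod x (36 * 36) = x % 1296 :=
    fun x => by norm_num [PySem.Int.mod_eq_emod_of_pos (show (0:Int) < 1296 by norm_num) (a := x)]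
  rcases lt_or_ge a 1 with hlt | h1a
  · -- a = 0
    have ha : a = 0 := by omega
    subst ha
    rw [tidLoop_nonpos _ _ (by omega)]
    decide
  rcases lt_or_ge a 36 with hc1 | h36
  · -- one iteration
    rw [tidLoop_pos a [] (by omega), e36, m36,
        tidLoop_nonpos _ _ (by omega : ¬ (0:Int) < a / 36)]
    rw [e1296, m1296]
    have hq : a / 1296 = 0 := by omega
    have hr : a % 1296 = a := by omega
    rw [hq, hr, e36, m36]
    have hq2 : a / 36 = 0 := by omega
    have hr2 : a % 36 = a := by omega
    rw [hq2, hr2]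
    have hlen := pyDigitChar_len a h0 (by omega)
    have h0c : pyDigitChar 0 = ['0'] := by decide
    simp [pad0, hlen, h0c]
  rcases lt_or_ge a 1296 with hc2 | h1296
  · -- two iterations
    rw [tidLoop_pos a [] (by omega), e36, m36,
        tidLoop_pos (a / 36) _ (by omega), e36, m36,
        tidLoop_nonpos _ _ (by omega : ¬ (0:Int) < a / 36 / 36)]
    rw [e1296, m1296]
    have hq : a / 1296 = 0 := by omega
    have hr : a % 1296 = a := by omega
    rw [hq, hr, e36, m36]
    have hmm : a / 36 % 36 = a / 36 := by omega
    rw [hmm]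
    have l1 := pyDigitChar_len (a / 36) (by omega) (by omega)
    have l2 := pyDigitChar_len (a % 36) (by omega) (by omega)
    have h0c : pyDigitChar 0 = ['0'] := by decide
    simp [pad0, l1, l2, h0c]
  · -- three iterations
    rw [tidLoop_pos a [] (by omega), e36, m36,
        tidLoop_pos (a / 36) _ (by omega), e36, m36,
        tidLoop_pos (a / 36 / 36) _ (by omega), e36, m36,
        tidLoop_nonpos _ _ (by omega : ¬ (0:Int) < a / 36 / 36 / 36)]
    rw [e1296, m1296, e36, m36]
    have hhi : a / 36 / 36 % 36 = a / 1296 := by omega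
    have hmid : a % 1296 / 36 = a / 36 % 36 := by omega
    have hlo : a % 1296 % 36 = a % 36 := by omega
    rw [hhi, hmid, hlo]
    have l1 := pyDigitChar_len (a / 1296) (by omega) (by omega)
    have l2 := pyDigitChar_len (a / 36 % 36) (by omega) (by omega)
    have l3 := pyDigitChar_len (a % 36) (by omega) (by omega)
    simp [pad0, l1, l2, l3]

-- ===== VERDICT (by name: the statement is the Claim_ definition above) =====
theorem tid_spec : Claim_equal_tid := by
  intro t hDom hPre
  unfold Spec_tid tid tid_alt
  have hmin : (min (36 ^ 3 * 100000) (2 ^ (8 * 4 - 1)) : Int) = 2147483648 := by decide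
  rw [hmin]
  by_cases ht : t ≥ (2147483648 : Int)
  · rw [if_pos ht, if_pos ht]
  · rw [if_neg ht, if_neg ht]
    have ht' : t < 2147483648 := by omega
    have hPre' : (0 : Int) ≤ t := hPre
    have ha0 : 0 ≤ PySem.Int.floordiv t 100000 := by
      rw [PySem.Int.floordiv_eq_ediv_of_pos (by norm_num)]; omega
    have ha1 : PySem.Int.floordiv t 100000 < 46656 := by
      rw [PySem.Int.floordiv_eq_ediv_of_pos (by norm_num)]; omega
    have hL := letters_eq (PySem.Int.floordiv t 100000) ha0 ha1
    apply congrArg String.ofList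
    apply congrArg ('T' :: ·)
    rw [hL]
    simp [List.append_assoc]
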